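-- pv_equiv track=rewrite | github.com/animicaorg/all | pq/py/utils/bech32.py | convertbits
-- ===== SOURCE A (Python) =====
-- from typing import Iterable, List, Sequence, Tuple
--
-- class Bech32Error(ValueError):
--     pass
--
-- def convertbits(
--     data: Iterable[int], from_bits: int, to_bits: int, pad: bool = True
-- ) -> List[int]:
--     """
--     General power-of-2 base conversion.
--     E.g. convertbits(bytes, 8, 5) to make Bech32 data words.
--
--     If pad=False, leftover bits must be zero (strict mode).
--     """
--     acc = 0
--     bits = 0
--     ret: List[int] = []
--     maxv = (1 << to_bits) - 1
--     max_acc = (1 << (from_bits + to_bits - 1)) - 1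
--
--     for value in data:
--         if value < 0 or (value >> from_bits):
--             raise Bech32Error("invalid value for convertbits")
--         acc = ((acc << from_bits) | value) & max_acc
--         bits += from_bits
--         while bits >= to_bits:
--             bits -= to_bits
--             ret.append((acc >> bits) & maxv)
--
--     if pad:
--         if bits:
--             ret.append((acc << (to_bits - bits)) & maxv)
--     else:
--         if bits >= from_bits:
--             raise Bech32Error("illegal zero-padding")
--         if ((acc << (to_bits - bits)) & maxv) != 0:
--             raise Bech32Error("non-zero padding")
--
--     return ret
-- ===== SOURCE B (Python) =====
-- from typing import Iterable, List
--
-- class Bech32Error(ValueError):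
--     pass
--
-- def convertbits(data, from_bits, to_bits, pad=True):
--     # Fold the whole input into one big integer, then slice it to_bits at a time.
--     total = 0
--     count = 0
--     for value in data:
--         if value < 0 or (value >> from_bits):
--             raise Bech32Error("invalid value for convertbits")
--         total = (total << from_bits) + value
--         count += 1
--     total_bits = from_bits * count
--     maxv = (1 << to_bits) - 1
--     n = total_bits // to_bits
--     out = [(total >> (total_bits - (i + 1) * to_bits)) & maxv for i in range(n)]
--     leftover = total_bits % to_bits
--     if pad:
--         if leftover:
--             out.append((total << (to_bits - leftover)) & maxv)
--     else:
--         if leftover >= from_bits: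
--             raise Bech32Error("illegal zero-padding")
--         if ((total << (to_bits - leftover)) & maxv) != 0:
--             raise Bech32Error("non-zero padding")
--     return out
-- ===== Notes on version B (the rewrite author's own statement) =====
-- stated objective: alternative
-- what changed: Instead of A's running accumulator that is masked each step and drained by an inner while-loop, B validates and folds the whole input into one big integer in a single pass and then extracts every to_bits-wide word (and the padding word / strict-mode checks) by direct shifts in a second pass.
-- outside the precondition, e.g. on convertbits([], 1, 0, True): A returns [], B raises ZeroDivisionError; on convertbits([], -1, 5, True): A returns [], B returns []
import Mathlib
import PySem

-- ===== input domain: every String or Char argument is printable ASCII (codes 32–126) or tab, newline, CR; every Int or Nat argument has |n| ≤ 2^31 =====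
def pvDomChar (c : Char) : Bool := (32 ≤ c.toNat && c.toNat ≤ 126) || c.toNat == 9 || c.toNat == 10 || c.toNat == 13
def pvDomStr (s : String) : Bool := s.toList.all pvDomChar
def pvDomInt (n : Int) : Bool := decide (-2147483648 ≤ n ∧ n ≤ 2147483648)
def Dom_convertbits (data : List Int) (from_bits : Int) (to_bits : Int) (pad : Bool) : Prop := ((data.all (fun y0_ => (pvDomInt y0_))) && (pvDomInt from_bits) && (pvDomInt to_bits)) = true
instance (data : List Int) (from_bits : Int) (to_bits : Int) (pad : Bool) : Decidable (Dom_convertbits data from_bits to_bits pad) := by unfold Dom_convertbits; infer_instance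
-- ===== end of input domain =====

-- B folds the whole input into one big integer and slices it, instead of A's running accumulator;
-- objective: alternative (a different decomposition, same asymptotic cost). Equality proved on Pre_.

-- Python '<<' / '>>' take the shift amount as int; a negative shift amount raises ValueError in
-- Python, which Pre_ excludes (there 'toNat' is exact: the amount is ≥ 0).
def pyShl (a k : Int) : Int := a <<< k.toNat
def pyShr (a k : Int) : Int := a >>> k.toNat

-- ===== PORT A =====
-- the inner 'while bits >= to_bits' loop; fuel = bits.toNat suffices since each pass removes
-- to_bits ≥ 1 bits (to_bits ≤ 0, where Python never terminates, is outside Pre_)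
def cbDrain (fuel : Nat) (to_bits maxv acc : Int) (bits : Int) (ret : List Int) : Int × List Int :=
  match fuel with
  | 0 => (bits, ret)
  | f + 1 =>
    if to_bits ≤ bits then
      cbDrain f to_bits maxv acc (bits - to_bits) (ret ++ [PySem.Int.band (pyShr acc (bits - to_bits)) maxv])
    else (bits, ret)

-- 'for value in data' with state (acc, bits, ret); none = raise Bech32Error (outside Pre_)
def cbLoop (from_bits to_bits maxv max_acc : Int) :
    List Int → Int → Int → List Int → Option (Int × Int × List Int)
  | [], acc, bits, ret => some (acc, bits, ret)
  | v :: rest, acc, bits, ret =>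
    if v < 0 ∨ pyShr v from_bits ≠ 0 then none   -- raise Bech32Error("invalid value for convertbits")
    else
      let acc' := PySem.Int.band (PySem.Int.bor (pyShl acc from_bits) v) max_acc
      let bits' := bits + from_bits
      let st := cbDrain bits'.toNat to_bits maxv acc' bits' ret
      cbLoop from_bits to_bits maxv max_acc rest acc' st.1 st.2

def convertbits (data : List Int) (from_bits : Int) (to_bits : Int) (pad : Bool) : List Int :=
  let maxv := pyShl 1 to_bits - 1
  let max_acc := pyShl 1 (from_bits + to_bits - 1) - 1
  match cbLoop from_bits to_bits maxv max_acc data 0 0 [] with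
  | none => []                                   -- raise propagated (outside Pre_)
  | some (acc, bits, ret) =>
    if pad then
      if bits ≠ 0 then ret ++ [PySem.Int.band (pyShl acc (to_bits - bits)) maxv] else ret
    else if from_bits ≤ bits then []             -- raise Bech32Error("illegal zero-padding")
    else if PySem.Int.band (pyShl acc (to_bits - bits)) maxv ≠ 0 then []   -- raise Bech32Error("non-zero padding")
    else ret

-- ===== PORT B =====
-- validate every value and fold all of them into one big integer; none = raise Bech32Error
def cbFold (from_bits : Int) : List Int → Int → Int → Option (Int × Int)
  | [], total, count => some (total, count)
  | v :: rest, total, count =>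
    if v < 0 ∨ pyShr v from_bits ≠ 0 then none   -- raise Bech32Error("invalid value for convertbits")
    else cbFold from_bits rest (pyShl total from_bits + v) (count + 1)

def convertbits_alt (data : List Int) (from_bits : Int) (to_bits : Int) (pad : Bool) : List Int :=
  match cbFold from_bits data 0 0 with
  | none => []                                   -- raise propagated (outside Pre_)
  | some (total, count) =>
    let total_bits := from_bits * count
    let maxv := pyShl 1 to_bits - 1
    let n := PySem.Int.floordiv total_bits to_bits
    let out := (List.range n.toNat).map
      (fun (i : Nat) => PySem.Int.band (pyShr total (total_bits - ((i : Int) + 1) * to_bits)) maxv)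
    let leftover := PySem.Int.mod total_bits to_bits
    if pad then
      if leftover ≠ 0 then out ++ [PySem.Int.band (pyShl total (to_bits - leftover)) maxv] else out
    else if from_bits ≤ leftover then []         -- raise Bech32Error("illegal zero-padding")
    else if PySem.Int.band (pyShl total (to_bits - leftover)) maxv ≠ 0 then []   -- raise Bech32Error("non-zero padding")
    else out

-- ===== PRECONDITION & SPEC =====
-- big-endian value of the data words (used only by Pre_'s strict-mode condition)
def cbBE (from_bits : Int) (data : List Int) : Nat :=
  data.foldl (fun t v => t * 2 ^ from_bits.toNat + v.toNat) 0

-- Pre_ = exactly where Python A returns: nonnegative from_bits and positive to_bits (a negative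
-- shift count raises ValueError and to_bits ≤ 0 loops forever or raises, except for the degenerate
-- near-empty inputs cited in the claim), every value in range (else Bech32Error), and in strict
-- mode (pad=False) leftover < from_bits and zero padding bits (else Bech32Error).
def Pre_convertbits (data : List Int) (from_bits : Int) (to_bits : Int) (pad : Bool) : Prop :=
  0 ≤ from_bits ∧ 1 ≤ to_bits ∧
  (∀ v ∈ data, 0 ≤ v ∧ v < (2 : Int) ^ from_bits.toNat) ∧
  (pad = false →
    (from_bits.toNat * data.length) % to_bits.toNat < from_bits.toNat ∧
    cbBE from_bits data % 2 ^ ((from_bits.toNat * data.length) % to_bits.toNat) = 0)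

instance (data : List Int) (from_bits : Int) (to_bits : Int) (pad : Bool) : Decidable (Pre_convertbits data from_bits to_bits pad) := by unfold Pre_convertbits; infer_instance

def pvWitness_convertbits : List Int × Int × Int × Bool := ([3, 1], 2, 1, true)

def Spec_convertbits (data : List Int) (from_bits : Int) (to_bits : Int) (pad : Bool) (out : List Int) : Prop := out = convertbits_alt data from_bits to_bits pad
instance (data : List Int) (from_bits : Int) (to_bits : Int) (pad : Bool) (out : List Int) : Decidable (Spec_convertbits data from_bits to_bits pad out) := by unfold Spec_convertbits; infer_instance

-- ===== CLAIM (what is proved, stated in full; the proofs are below) =====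
def Claim_equal_convertbits : Prop := ∀ (data : List Int) (from_bits : Int) (to_bits : Int) (pad : Bool), Dom_convertbits data from_bits to_bits pad → Pre_convertbits data from_bits to_bits pad → Spec_convertbits data from_bits to_bits pad (convertbits data from_bits to_bits pad)

-- ===== LEMMAS AND PROOFS =====

-- the Nat-level model shared by both ports: big-endian fold and the emitted to_bits-wide windows
def natBE (F : Nat) (ns : List Nat) (a : Nat) : Nat := ns.foldl (fun t v => t * 2 ^ F + v) a

def natWords (T V VB : Nat) : List Int :=
  (List.range (VB / T)).map (fun i => ((V / 2 ^ (VB - (i + 1) * T)) % 2 ^ T : Nat))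

-- ---- small bit/arith facts ----
theorem lor_mul_pow_add {a v F : Nat} (h : v < 2 ^ F) : (a * 2 ^ F) ||| v = a * 2 ^ F + v := by
  have hv : ∀ j, F ≤ j → v.testBit j = false := fun j hj =>
    Nat.testBit_eq_false_of_lt (lt_of_lt_of_le h (Nat.pow_le_pow_right (by norm_num) hj))
  have h2 : a * 2 ^ F + v = 2 ^ F * a + v := by ring_nf
  rw [h2]
  apply Nat.eq_of_testBit_eq
  intro j
  rw [Nat.testBit_two_pow_mul_add a h j, Nat.testBit_lor, ← Nat.shiftLeft_eq,
    Nat.testBit_shiftLeft]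
  by_cases hj : j < F
  · simp [Nat.not_le.mpr hj]
  · simp [Nat.not_lt.mp hj, hv j (Nat.not_lt.mp hj)]

theorem band_mask (a : Int) (h : 0 ≤ a) (t : Nat) :
    PySem.Int.band a ((2 : Int) ^ t - 1) = ((a.toNat % 2 ^ t : Nat) : Int) := by
  have h2 : ((2 ^ t - 1 : Nat) : Int) = (2 : Int) ^ t - 1 := by
    have := Nat.one_le_two_pow (n := t)
    push_cast [this]; ring
  rw [← h2, ← Int.toNat_of_nonneg h, PySem.Int.band_natCast, Nat.and_two_pow_sub_one_eq_mod]
  simp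

theorem shr_nat (n k : Nat) : pyShr (n : Int) (k : Nat) = ((n / 2 ^ k : Nat) : Int) := by
  simp only [pyShr, Int.toNat_natCast, Int.shiftRight_eq_div_pow]
  push_cast
  rfl

theorem shl_nonneg (a : Int) (h : 0 ≤ a) (k : Nat) :
    pyShl a (k : Nat) = ((a.toNat * 2 ^ k : Nat) : Int) := by
  rw [pyShl, Int.shiftLeft_eq]
  push_cast [Int.toNat_of_nonneg h]
  simp

-- window of a product-plus-remainder: the low bits do not shift the high window
theorem div_high {x R d e : Nat} (hR : R < 2 ^ d) : (x * 2 ^ d + R) / 2 ^ (d + e) = x / 2 ^ e := by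
  rw [pow_add, ← Nat.div_div_eq_div_mul, mul_comm x, Nat.mul_add_div (Nat.two_pow_pos d),
    Nat.div_eq_of_lt hR, add_zero]

-- a to_bits window only depends on the residue below its top
theorem window_congr {x y m k t : Nat} (hmod : x % 2 ^ m = y % 2 ^ m) (h : k + t ≤ m) :
    x / 2 ^ k % 2 ^ t = y / 2 ^ k % 2 ^ t := by
  have hd : (2 : Nat) ^ k * 2 ^ t ∣ 2 ^ m := by rw [← pow_add]; exact pow_dvd_pow 2 h
  rw [← Nat.mod_mul_right_div_self, ← Nat.mod_mul_right_div_self (m := y),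
    ← Nat.mod_mod_of_dvd x hd, ← Nat.mod_mod_of_dvd y hd, hmod]

theorem mul_pow_mod {a e b : Nat} : (a * 2 ^ e) % 2 ^ (e + b) = (a % 2 ^ b) * 2 ^ e := by
  rw [pow_add, mul_comm ((2:Nat)^e) ((2:Nat)^b), Nat.mul_mod_mul_right]

-- ---- natBE facts ----
theorem natBE_cons (F v : Nat) (ns : List Nat) (a : Nat) :
    natBE F (v :: ns) a = natBE F ns (a * 2 ^ F + v) := rfl

theorem natBE_split (F : Nat) (ns : List Nat) : ∀ (a : Nat),
    natBE F ns a = a * 2 ^ (F * ns.length) + natBE F ns 0 := by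
  induction ns with
  | nil => intro a; simp [natBE]
  | cons v rest ih =>
    intro a
    show natBE F rest (a * 2^F + v) = a * 2 ^ (F * (rest.length + 1)) + natBE F rest (0 * 2^F + v)
    rw [ih (a * 2^F + v), ih (0 * 2^F + v), Nat.mul_add, Nat.mul_one, pow_add]
    ring

theorem natBE_lt (F : Nat) (ns : List Nat) (hv : ∀ v ∈ ns, v < 2 ^ F) :
    natBE F ns 0 < 2 ^ (F * ns.length) := by
  induction ns with
  | nil => simp [natBE]
  | cons v rest ih =>
    have hvlt : v < 2 ^ F := hv v (by simp)
    have ihr := ih (fun w hw => hv w (by simp [hw]))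
    show natBE F rest (0 * 2^F + v) < 2 ^ (F * (rest.length + 1))
    rw [natBE_split F rest, Nat.mul_add, Nat.mul_one, pow_add]
    have h1 : 0 * 2^F + v ≤ 2 ^ F - 1 := by omega
    calc (0 * 2^F + v) * 2 ^ (F * rest.length) + natBE F rest 0
        ≤ (2 ^ F - 1) * 2 ^ (F * rest.length) + natBE F rest 0 :=
          Nat.add_le_add_right (Nat.mul_le_mul_right _ h1) _
      _ < (2 ^ F - 1) * 2 ^ (F * rest.length) + 2 ^ (F * rest.length) := Nat.add_lt_add_left ihr _
      _ = 2 ^ (F * rest.length) * 2 ^ F := by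
          have hQ : 1 ≤ 2 ^ F := Nat.one_le_two_pow
          have : (2 ^ F - 1) * 2 ^ (F * rest.length) + 2 ^ (F * rest.length)
              = (2 ^ F - 1 + 1) * 2 ^ (F * rest.length) := by ring
          rw [this, Nat.sub_add_cancel hQ, mul_comm]

-- ---- drain characterisation ----
theorem natWords_zero (T V : Nat) {b : Nat} (hb : b < T) : natWords T V b = [] := by
  simp [natWords, Nat.div_eq_of_lt hb]

theorem natWords_step (T V b : Nat) (hT : 1 ≤ T) (hb : T ≤ b) :
    natWords T V b = (((V / 2 ^ (b - T)) % 2 ^ T : Nat) : Int) :: natWords T V (b - T) := by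
  unfold natWords
  rw [Nat.div_eq_sub_div hT hb, List.range_succ_eq_map, List.map_cons, List.map_map]
  congr 1
  · norm_num
  · apply List.map_congr_left
    intro i _
    simp only [Function.comp_apply, Nat.succ_eq_add_one]
    have h3 : (i + 1 + 1) * T = T + (i + 1) * T := by ring
    rw [h3, ← Nat.sub_sub]

theorem drain_spec (T : Nat) (hT : 1 ≤ T) :
    ∀ (fuel b : Nat), b ≤ fuel → ∀ (acc : Int), 0 ≤ acc → ∀ (ret : List Int),
    cbDrain fuel (T : Int) ((2 : Int) ^ T - 1) acc (b : Int) ret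
      = ((((b % T : Nat)) : Int), ret ++ natWords T acc.toNat b) := by
  intro fuel
  induction fuel with
  | zero =>
    intro b hb acc hacc ret
    have hb0 : b = 0 := Nat.le_zero.mp hb
    subst hb0
    simp [cbDrain, natWords_zero T acc.toNat (show 0 < T from hT)]
  | succ f ih =>
    intro b hb acc hacc ret
    by_cases hTb : T ≤ b
    · have hcond : (T : Int) ≤ (b : Int) := by exact_mod_cast hTb
      have hsub : (b : Int) - (T : Int) = ((b - T : Nat) : Int) := by push_cast [hTb]; ring
      have hword : PySem.Int.band (pyShr acc ((b : Int) - (T : Int))) ((2 : Int) ^ T - 1)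
          = (((acc.toNat / 2 ^ (b - T)) % 2 ^ T : Nat) : Int) := by
        rw [hsub, ← Int.toNat_of_nonneg hacc, shr_nat, band_mask _ (by positivity)
          ]
        simp only [Int.toNat_natCast]
      rw [cbDrain, if_pos hcond, hword, hsub, ih (b - T) (by omega) acc hacc _]
      rw [natWords_step T acc.toNat b hT hTb]
      have : b % T = (b - T) % T := by
        conv_lhs => rw [← Nat.sub_add_cancel hTb]
        rw [Nat.add_mod_right]
      rw [← this]
      simp
    · have hcond : ¬ ((T : Int) ≤ (b : Int)) := by exact_mod_cast hTb
      rw [cbDrain, if_neg hcond, natWords_zero T acc.toNat (by omega)]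
      rw [Nat.mod_eq_of_lt (by omega)]
      simp

-- ---- the gluing of per-element windows ----
theorem natWords_glue (T F : Nat) (hT : 1 ≤ T) (W m : Nat) (rest : List Nat)
    (hv : ∀ v ∈ rest, v < 2 ^ F) :
    natWords T (natBE F rest W) (m + F * rest.length)
      = natWords T W m ++ natWords T (natBE F rest (W % 2 ^ (m % T))) (m % T + F * rest.length) := by
  set d := F * rest.length with hd
  set N0 := natBE F rest 0 with hN0
  have hN0lt : N0 < 2 ^ d := natBE_lt F rest hv
  have hV : natBE F rest W = W * 2 ^ d + N0 := natBE_split F rest W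
  have hV' : natBE F rest (W % 2 ^ (m % T)) = (W % 2 ^ (m % T)) * 2 ^ d + N0 := natBE_split F rest _
  set q := m / T with hq
  set r := m % T with hr
  have hqr : m = T * q + r := (Nat.div_add_mod m T).symm
  have hTpos : 0 < T := hT
  have hcount : (m + d) / T = q + (r + d) / T := by
    have h1 : m + d = T * q + (r + d) := by omega
    rw [h1, Nat.mul_add_div hTpos]
  have hmod : (W * 2 ^ d + N0) % 2 ^ (r + d) = ((W % 2 ^ r) * 2 ^ d + N0) % 2 ^ (r + d) := by
    have h1 : W ≡ W % 2 ^ r [MOD 2 ^ r] := (Nat.mod_mod_of_dvd W dvd_rfl).symm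
    have h2 := (h1.mul_right' (2 ^ d)).add_right N0
    rw [pow_add]
    exact h2
  rw [hV, hV']
  unfold natWords
  rw [hcount, List.range_add, List.map_append, List.map_map]
  congr 1
  · apply List.map_congr_left
    intro i hi
    have hiq : i < q := List.mem_range.mp hi
    have hk : (i + 1) * T ≤ m := by
      calc (i + 1) * T ≤ q * T := Nat.mul_le_mul_right T hiq
        _ = T * q := mul_comm _ _
        _ ≤ m := by omega
    have he : m + d - (i + 1) * T = d + (m - (i + 1) * T) := by
      generalize (i + 1) * T = k at hk ⊢
      omega
    rw [he, div_high hN0lt]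
  · apply List.map_congr_left
    intro x hx
    have hxlt : x < (r + d) / T := List.mem_range.mp hx
    have hk : (x + 1) * T ≤ r + d := by
      calc (x + 1) * T ≤ ((r + d) / T) * T := Nat.mul_le_mul_right T hxlt
        _ ≤ r + d := Nat.div_mul_le_self _ _
    have hTk : T ≤ (x + 1) * T := by
      calc T = 1 * T := (one_mul T).symm
        _ ≤ (x + 1) * T := Nat.mul_le_mul_right T (by omega)
    simp only [Function.comp_apply]
    have he : m + d - (q + x + 1) * T = (r + d) - (x + 1) * T := by
      have h1 : (q + x + 1) * T = T * q + (x + 1) * T := by ring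
      rw [h1]
      generalize (x + 1) * T = k at hk hTk ⊢
      omega
    rw [he]
    congr 1
    apply window_congr hmod
    generalize hgen : (x + 1) * T = k at hk hTk ⊢
    omega

theorem lt_combine {u b v F : Nat} (hu : u < 2 ^ b) (hv : v < 2 ^ F) :
    u * 2 ^ F + v < 2 ^ (b + F) := by
  rw [pow_add]
  calc u * 2 ^ F + v < u * 2 ^ F + 2 ^ F := by omega
    _ = (u + 1) * 2 ^ F := by ring
    _ ≤ 2 ^ b * 2 ^ F := Nat.mul_le_mul_right _ (by omega)

theorem natWords_congr (T : Nat) {x y m : Nat} (h : x % 2 ^ m = y % 2 ^ m) :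
    natWords T x m = natWords T y m := by
  unfold natWords
  apply List.map_congr_left
  intro i hi
  have hiq : i < m / T := List.mem_range.mp hi
  have hk : (i + 1) * T ≤ m := by
    calc (i + 1) * T ≤ (m / T) * T := Nat.mul_le_mul_right T hiq
      _ ≤ m := Nat.div_mul_le_self _ _
  have hTk : T ≤ (i + 1) * T := by
    calc T = 1 * T := (one_mul T).symm
      _ ≤ (i + 1) * T := Nat.mul_le_mul_right T (by omega)
  congr 1
  apply window_congr h
  generalize (i + 1) * T = k at hk hTk ⊢
  omega

theorem natBE_mod_congr (F : Nat) (ns : List Nat) {x y c e : Nat} (h : x % 2 ^ c = y % 2 ^ c)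
    (he : e ≤ c + F * ns.length) :
    natBE F ns x % 2 ^ e = natBE F ns y % 2 ^ e := by
  have h1 : natBE F ns x % 2 ^ (c + F * ns.length) = natBE F ns y % 2 ^ (c + F * ns.length) := by
    rw [natBE_split F ns x, natBE_split F ns y, pow_add]
    exact ((Nat.ModEq.mul_right' (2 ^ (F * ns.length)) h).add_right (natBE F ns 0))
  calc natBE F ns x % 2 ^ e = natBE F ns x % 2 ^ (c + F * ns.length) % 2 ^ e := by
        rw [Nat.mod_mod_of_dvd _ (pow_dvd_pow 2 he)]
    _ = natBE F ns y % 2 ^ (c + F * ns.length) % 2 ^ e := by rw [h1]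
    _ = natBE F ns y % 2 ^ e := Nat.mod_mod_of_dvd _ (pow_dvd_pow 2 he)

-- ---- main loop invariant ----
theorem loop_spec (F T : Nat) (hT : 1 ≤ T) :
    ∀ (ns : List Nat) (acc : Int) (b : Nat) (ret : List Int),
    (∀ v ∈ ns, v < 2 ^ F) → 0 ≤ acc → b < T →
    ∃ acc' : Int,
      cbLoop (F : Int) (T : Int) ((2 : Int) ^ T - 1) ((2 : Int) ^ (F + T - 1) - 1)
          (ns.map (fun n : Nat => (n : Int))) acc (b : Int) ret
        = some (acc', (((b + F * ns.length) % T : Nat) : Int),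
                ret ++ natWords T (natBE F ns (acc.toNat % 2 ^ b)) (b + F * ns.length))
      ∧ 0 ≤ acc'
      ∧ acc'.toNat % 2 ^ ((b + F * ns.length) % T)
          = natBE F ns (acc.toNat % 2 ^ b) % 2 ^ ((b + F * ns.length) % T)  := by
  intro ns
  induction ns with
  | nil =>
    intro acc b ret _ hacc hb
    refine ⟨acc, ?_, hacc, ?_⟩
    · simp [cbLoop, Nat.mod_eq_of_lt hb, natBE, natWords_zero T _ hb]
    · simp only [List.length_nil, Nat.mul_zero, Nat.add_zero, Nat.mod_eq_of_lt hb, natBE,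
        List.foldl_nil]
      exact (Nat.mod_mod_of_dvd _ dvd_rfl).symm
  | cons v rest ih =>
    intro acc b ret hv hacc hb
    have hvF : v < 2 ^ F := hv v (by simp)
    have hv' : ∀ w ∈ rest, w < 2 ^ F := fun w hw => hv w (by simp [hw])
    -- the guard does not fire
    have hg1 : ¬ ((v : Int) < 0) := Int.not_lt.mpr (by positivity)
    have hg2 : pyShr (v : Int) (F : Int) = 0 := by
      rw [shr_nat, Nat.div_eq_of_lt hvF]; rfl
    -- the new accumulator
    set U := acc.toNat % 2 ^ b with hU
    set W := U * 2 ^ F + v with hW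
    set A1 := (acc.toNat * 2 ^ F + v) % 2 ^ (F + T - 1) with hA1
    have hacc' : PySem.Int.band (PySem.Int.bor (pyShl acc (F : Int)) (v : Int))
        ((2 : Int) ^ (F + T - 1) - 1) = ((A1 : Nat) : Int) := by
      rw [shl_nonneg acc hacc, PySem.Int.bor_natCast, lor_mul_pow_add hvF,
        band_mask _ (by positivity), Int.toNat_natCast]
    have hWlt : W < 2 ^ (b + F) := lt_combine (Nat.mod_lt _ (Nat.two_pow_pos b)) hvF
    have hble : b + F ≤ F + T - 1 := by omega
    have hA1W : A1 % 2 ^ (b + F) = W % 2 ^ (b + F) := by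
      have h1 : A1 % 2 ^ (b + F) = (acc.toNat * 2 ^ F + v) % 2 ^ (b + F) :=
        Nat.mod_mod_of_dvd _ (pow_dvd_pow 2 hble)
      have hdecomp : acc.toNat * 2 ^ F + v
          = (acc.toNat / 2 ^ b) * 2 ^ (b + F) + W := by
        have hdm := Nat.div_add_mod acc.toNat (2 ^ b)
        calc acc.toNat * 2 ^ F + v = (2 ^ b * (acc.toNat / 2 ^ b) + U) * 2 ^ F + v := by
              rw [hU, hdm]
          _ = (acc.toNat / 2 ^ b) * (2 ^ b * 2 ^ F) + (U * 2 ^ F + v) := by ring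
          _ = (acc.toNat / 2 ^ b) * 2 ^ (b + F) + W := by rw [← pow_add, hW]
      rw [h1, hdecomp, add_comm, Nat.add_mul_mod_self_right]
    have hA1Weq : A1 % 2 ^ (b + F) = W := by rw [hA1W, Nat.mod_eq_of_lt hWlt]
    -- the drained state
    have hdrain := drain_spec T hT (b + F) (b + F) le_rfl ((A1 : Nat) : Int) (by positivity) ret
    set b' := (b + F) % T with hb'
    have hb'lt : b' < T := Nat.mod_lt _ (by omega)
    have hb'le : b' ≤ b + F := Nat.mod_le _ _
    have hU' : A1 % 2 ^ b' = W % 2 ^ b' := by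
      calc A1 % 2 ^ b' = A1 % 2 ^ (b + F) % 2 ^ b' :=
            (Nat.mod_mod_of_dvd _ (pow_dvd_pow 2 hb'le)).symm
        _ = W % 2 ^ b' := by rw [hA1Weq, ← Nat.mod_mod_of_dvd _ (pow_dvd_pow 2 hb'le)]
    have hwords : natWords T A1 (b + F) = natWords T W (b + F) := by
      apply natWords_congr
      rw [hA1Weq, Nat.mod_eq_of_lt hWlt]
    have hbitseq : (b' + F * rest.length) % T = (b + F * (v :: rest).length) % T := by
      rw [hb', Nat.mod_add_mod]
      congr 1
      simp only [List.length_cons]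
      ring
    have hBE : natBE F (v :: rest) U = natBE F rest W := by rw [natBE_cons]
    have hlen2 : b + F * (v :: rest).length = (b + F) + F * rest.length := by
      simp only [List.length_cons]; ring
    have hglue := natWords_glue T F hT W (b + F) rest hv'
    -- recursive call
    obtain ⟨acc'', heq, hnn, hinv⟩ :=
      ih ((A1 : Nat) : Int) b' (ret ++ natWords T A1 (b + F)) hv' (by positivity) hb'lt
    simp only [Int.toNat_natCast] at heq hinv
    refine ⟨acc'', ?_, hnn, ?_⟩
    · rw [List.map_cons, cbLoop, if_neg (by push_neg; exact ⟨by positivity, hg2⟩)]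
      have hbits' : (b : Int) + (F : Int) = ((b + F : Nat) : Int) := by push_cast; ring
      simp only [hacc', hbits', Int.toNat_natCast]
      rw [hdrain]
      simp only [Int.toNat_natCast]
      rw [heq, hU', ← hbitseq, hBE, hlen2, hglue, hb', hwords]
      simp only [List.append_assoc]
    · rw [← hbitseq, hBE, hinv]
      have hle : (b' + F * rest.length) % T ≤ b' + F * rest.length := Nat.mod_le _ _
      have h1 : (A1 % 2 ^ b') % 2 ^ b' = W % 2 ^ b' := by
        rw [Nat.mod_mod_of_dvd _ dvd_rfl, hU']
      exact natBE_mod_congr F rest (c := b') h1 hle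

-- ---- B-side characterisation ----
theorem fold_spec (F : Nat) :
    ∀ (ns : List Nat) (total count : Int), (∀ v ∈ ns, v < 2 ^ F) → 0 ≤ total →
    cbFold (F : Int) (ns.map (fun n : Nat => (n : Int))) total count
      = some (((natBE F ns total.toNat : Nat) : Int), count + ns.length) := by
  intro ns
  induction ns with
  | nil =>
    intro total count _ htot
    simp [cbFold, natBE, Int.toNat_of_nonneg htot]
  | cons v rest ih =>
    intro total count hv htot
    have hvF : v < 2 ^ F := hv v (by simp)
    have hg2 : pyShr (v : Int) (F : Int) = 0 := by
      rw [shr_nat, Nat.div_eq_of_lt hvF]; rfl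
    rw [List.map_cons, cbFold, if_neg (by push_neg; exact ⟨by positivity, hg2⟩)]
    have hstep : pyShl total (F : Int) + (v : Int) = ((total.toNat * 2 ^ F + v : Nat) : Int) := by
      rw [shl_nonneg total htot]; push_cast; ring
    rw [hstep, ih _ _ (fun w hw => hv w (by simp [hw])) (by positivity),
      Int.toNat_natCast, natBE_cons]
    congr 2
    simp only [List.length_cons]
    push_cast
    ring

theorem alt_spec (F T : Nat) (hT : 1 ≤ T) (ns : List Nat) (pad : Bool)
    (hv : ∀ v ∈ ns, v < 2 ^ F) :
    convertbits_alt (ns.map (fun n : Nat => (n : Int))) (F : Int) (T : Int) pad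
      = (let N := natBE F ns 0
         let L := (F * ns.length) % T
         let out := natWords T N (F * ns.length)
         if pad then
           if L ≠ 0 then out ++ [(((N % 2 ^ L) * 2 ^ (T - L) : Nat) : Int)] else out
         else if F ≤ L then []
         else if (((N % 2 ^ L) * 2 ^ (T - L) : Nat) : Int) ≠ 0 then []
         else out) := by
  have hfold := fold_spec F ns 0 0 hv le_rfl
  set N := natBE F ns 0 with hN
  set L := (F * ns.length) % T with hL
  have hLlt : L < T := Nat.mod_lt _ (by omega)
  unfold convertbits_alt
  rw [show ((0 : Int).toNat) = (0 : Nat) from rfl] at hfold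
  rw [hfold]
  have htb : (F : Int) * ((ns.length : Nat) : Int) = ((F * ns.length : Nat) : Int) := by
    push_cast; ring
  simp only [zero_add, htb]
  have hmaxv : pyShl 1 (T : Int) - 1 = (2 : Int) ^ T - 1 := by
    rw [pyShl, Int.toNat_natCast, Int.shiftLeft_eq, one_mul]
  have hn : PySem.Int.floordiv ((F * ns.length : Nat) : Int) (T : Int) = ((F * ns.length) / T : Nat) :=
    PySem.Int.floordiv_natCast _ _
  have hlef : PySem.Int.mod ((F * ns.length : Nat) : Int) (T : Int) = ((F * ns.length) % T : Nat) :=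
    PySem.Int.mod_natCast _ _
  simp only [hmaxv, hn, hlef, Int.toNat_natCast]
  -- the extracted window list is natWords
  have hout : (List.range ((F * ns.length) / T)).map
      (fun (i : Nat) => PySem.Int.band
        (pyShr ((N : Nat) : Int) (((F * ns.length : Nat) : Int) - ((i : Int) + 1) * (T : Int)))
        ((2 : Int) ^ T - 1))
      = natWords T N (F * ns.length) := by
    unfold natWords
    apply List.map_congr_left
    intro i hi
    have hiq : i < (F * ns.length) / T := List.mem_range.mp hi
    have hk : (i + 1) * T ≤ F * ns.length := by
      calc (i + 1) * T ≤ ((F * ns.length) / T) * T := Nat.mul_le_mul_right T hiq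
        _ ≤ F * ns.length := Nat.div_mul_le_self _ _
    have hcast : ((F * ns.length : Nat) : Int) - ((i : Int) + 1) * (T : Int)
        = ((F * ns.length - (i + 1) * T : Nat) : Int) := by
      push_cast [hk]; ring
    rw [hcast, shr_nat, band_mask _ (by positivity), Int.toNat_natCast]
  rw [hout]
  -- the padding word
  have hword : PySem.Int.band (pyShl ((N : Nat) : Int) ((T : Int) - ((L : Nat) : Int)))
      ((2 : Int) ^ T - 1) = (((N % 2 ^ L) * 2 ^ (T - L) : Nat) : Int) := by
    have hcast : (T : Int) - ((L : Nat) : Int) = ((T - L : Nat) : Int) := by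
      push_cast [Nat.le_of_lt hLlt]; ring
    rw [hcast, shl_nonneg _ (by positivity), Int.toNat_natCast, band_mask _ (by positivity),
      Int.toNat_natCast]
    congr 1
    have h2 := mul_pow_mod (a := N) (e := T - L) (b := L)
    rw [show (T - L) + L = T by omega] at h2
    exact h2
  by_cases hpad : pad
  · simp only [hpad, if_true]
    have hcond : (((L : Nat) : Int) ≠ 0) ↔ (L ≠ 0) := by
      constructor
      · intro h hc; exact h (by rw [hc]; rfl)
      · intro h hc; exact h (by exact_mod_cast hc)
    by_cases hLz : L ≠ 0
    · rw [if_pos (hcond.mpr hLz), if_pos hLz, hword]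
    · rw [if_neg (fun hc => hLz (hcond.mp hc)), if_neg hLz]

  · simp only [hpad, if_false]
    have hcond2 : ((F : Int) ≤ ((L : Nat) : Int)) ↔ (F ≤ L) := by exact_mod_cast Iff.rfl
    by_cases hFL : F ≤ L
    · rw [if_pos (hcond2.mpr hFL), if_pos hFL]
      rfl
    · rw [if_neg (fun hc => hFL (hcond2.mp hc)), if_neg hFL, hword]
      rfl

-- ===== VERDICT (by name: the statement is the Claim_ definition above) =====
theorem convertbits_spec : Claim_equal_convertbits := by
  intro data from_bits to_bits pad _ hpre
  obtain ⟨hf, ht, hvals, _⟩ := hpre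
  unfold Spec_convertbits
  set F := from_bits.toNat with hF
  set T := to_bits.toNat with hTdef
  have hT1 : 1 ≤ T := by omega
  have hfrom : from_bits = (F : Int) := by omega
  have hto : to_bits = (T : Int) := by omega
  set ns := data.map Int.toNat with hns
  have hdata : data = ns.map (fun n : Nat => (n : Int)) := by
    rw [hns, List.map_map]
    conv_lhs => rw [show data = data.map id from (List.map_id data).symm]
    apply List.map_congr_left
    intro v hv
    simp only [Function.comp_apply, id]
    exact (Int.toNat_of_nonneg (hvals v hv).1).symm
  have hv : ∀ v ∈ ns, v < 2 ^ F := by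
    intro v hvm
    rw [hns] at hvm
    obtain ⟨w, hw, rfl⟩ := List.mem_map.mp hvm
    have h2 := (hvals w hw).2
    have h1 := (hvals w hw).1
    have hcast : ((2 ^ F : Nat) : Int) = (2 : Int) ^ F := by push_cast; rfl
    exact (Int.toNat_lt h1).mpr (by rw [hcast]; exact h2)
  rw [hdata, hfrom, hto]
  -- evaluate port A via the loop invariant
  obtain ⟨accf, heq, hnn, hinv⟩ := loop_spec F T hT1 ns 0 0 [] hv le_rfl hT1
  simp only [Nat.cast_zero, pow_zero, Nat.mod_one, zero_add, List.nil_append,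
    Int.toNat_zero] at heq hinv
  set N := natBE F ns 0 with hN
  set L := (F * ns.length) % T with hL
  have hLlt : L < T := Nat.mod_lt _ (by omega)
  have hmaxv : pyShl 1 (T : Int) - 1 = (2 : Int) ^ T - 1 := by
    rw [pyShl, Int.toNat_natCast, Int.shiftLeft_eq, one_mul]
  have hFT : (F : Int) + (T : Int) - 1 = ((F + T - 1 : Nat) : Int) := by
    push_cast [show 1 ≤ F + T by omega]
    omega
  have hmaxacc : pyShl 1 ((F : Int) + (T : Int) - 1) - 1 = (2 : Int) ^ (F + T - 1) - 1 := by
    rw [hFT, pyShl, Int.toNat_natCast, Int.shiftLeft_eq, one_mul]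
  -- the shared padding word
  have hword : PySem.Int.band (pyShl accf ((T : Int) - ((L : Nat) : Int))) ((2 : Int) ^ T - 1)
      = (((N % 2 ^ L) * 2 ^ (T - L) : Nat) : Int) := by
    have hcast : (T : Int) - ((L : Nat) : Int) = ((T - L : Nat) : Int) := by
      push_cast [Nat.le_of_lt hLlt]; ring
    rw [hcast, shl_nonneg accf hnn, band_mask _ (by positivity), Int.toNat_natCast]
    congr 1
    have h2 := mul_pow_mod (a := accf.toNat) (e := T - L) (b := L)
    rw [show (T - L) + L = T by omega] at h2
    rw [h2, hinv]
  rw [alt_spec F T hT1 ns pad hv]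
  unfold convertbits
  simp only [hmaxv, hmaxacc, heq]
  by_cases hpad : pad
  · simp only [hpad, if_true]
    have hcond : (((L : Nat) : Int) ≠ 0) ↔ (L ≠ 0) := by
      constructor
      · intro h hc; exact h (by rw [hc]; rfl)
      · intro h hc; exact h (by exact_mod_cast hc)
    by_cases hLz : L ≠ 0
    · rw [if_pos (hcond.mpr hLz), if_pos hLz, hword]
    · rw [if_neg (fun hc => hLz (hcond.mp hc)), if_neg hLz]
  · simp only [hpad, if_false]
    have hcond2 : ((F : Int) ≤ ((L : Nat) : Int)) ↔ (F ≤ L) := by exact_mod_cast Iff.rfl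
    by_cases hFL : F ≤ L
    · rw [if_pos (hcond2.mpr hFL), if_pos hFL]
      rfl
    · rw [if_neg (fun hc => hFL (hcond2.mp hc)), if_neg hFL, hword]
      rfl
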